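-- pv_equiv track=rewrite | github.com/pattywong/Multi-label-Classification-of-Chest-X-ray-Images-for-Disease-Diagnosis | utils/utils.py | get_label_set
-- ===== SOURCE A (Python) =====
-- def get_label_set(class_label_batch, n_classes):
--     '''
--     class_label_batch: model prediction in a batch array
--     return an array of sets of labels
--     '''
--
--     results = []
--     for class_label in class_label_batch:
--         label_set = bin(class_label)[2:]
--         label_set = [int(i) for i in label_set]
--         result = ([0] * (n_classes - len(label_set))) + label_set
--         results.append(result)
--     return results
-- ===== SOURCE B (Python) =====
-- def get_label_set(class_label_batch, n_classes):
--     results = []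
--     for class_label in class_label_batch:
--         width = max(n_classes, class_label.bit_length(), 1)
--         results.append([(class_label >> (width - 1 - i)) & 1 for i in range(width)])
--     return results
-- ===== Notes on version B (the rewrite author's own statement) =====
-- stated objective: idiomatic
-- what changed: B computes each row by arithmetic bit extraction ((label >> (width-1-i)) & 1 over range(width) with width = max(n_classes, bit_length, 1)) instead of A's round-trip through the bin() string, per-character int() parsing and zero-list concatenation.
-- outside the precondition, e.g. on get_label_set([-3], 5): A raises ValueError, B returns [[1, 1, 1, 0, 1]]
import Mathlib
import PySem

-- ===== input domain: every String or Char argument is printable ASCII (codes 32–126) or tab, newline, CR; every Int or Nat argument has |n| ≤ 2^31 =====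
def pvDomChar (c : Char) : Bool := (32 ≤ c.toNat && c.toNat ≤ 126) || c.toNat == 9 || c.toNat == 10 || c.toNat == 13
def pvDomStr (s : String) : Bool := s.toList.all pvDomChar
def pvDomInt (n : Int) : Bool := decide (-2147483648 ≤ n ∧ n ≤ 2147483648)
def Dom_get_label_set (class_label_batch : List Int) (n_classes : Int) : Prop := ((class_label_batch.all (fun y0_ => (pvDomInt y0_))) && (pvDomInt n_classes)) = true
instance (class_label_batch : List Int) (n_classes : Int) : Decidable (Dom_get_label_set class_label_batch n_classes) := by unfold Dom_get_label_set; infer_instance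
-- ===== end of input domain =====

-- B replaces A's string round-trip through bin() by direct arithmetic bit extraction (idiomatic/alternative, same cost class).

-- ===== PORT A =====
-- bin(class_label)[2:] : pyBin's characters, sliced from index 2;
-- int(i) per digit char : PySem.Int.ofChars? [i] — Pre_ excludes negative labels, the only
-- inputs where that int() raises (ValueError on 'b'), so the .getD 0 fallback is never taken.
def get_label_set (class_label_batch : List Int) (n_classes : Int) : List (List Int) :=
  class_label_batch.foldl (fun results class_label =>
    let label_set := PySem.Chars.slice (PySem.Int.toBinChars0b class_label) (some 2) none
    let label_set2 := label_set.map (fun i => (PySem.Int.ofChars? [i]).getD 0)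
    let result := List.replicate (n_classes - (label_set2.length : Int)).toNat (0 : Int) ++ label_set2
    results ++ [result]) []

-- ===== PORT B =====
-- width - 1 - i is ≥ 0 for every i in range(width), so .toNat is exact for Python's `>>`.
def get_label_set_alt (class_label_batch : List Int) (n_classes : Int) : List (List Int) :=
  class_label_batch.foldl (fun results class_label =>
    let width := max (max n_classes ((PySem.Int.bitLength class_label : Nat) : Int)) 1
    let row := (PySem.List.pyRange 0 width 1).map
      (fun i => PySem.Int.band (class_label >>> (width - 1 - i).toNat) 1)
    results ++ [row]) []

-- ===== PRECONDITION & SPEC =====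
-- A raises ValueError on any negative label (int('b') on bin(-k)[2:]); exactly those inputs are excluded.
def Pre_get_label_set (class_label_batch : List Int) (n_classes : Int) : Prop :=
  ∀ x ∈ class_label_batch, 0 ≤ x
instance (class_label_batch : List Int) (n_classes : Int) : Decidable (Pre_get_label_set class_label_batch n_classes) := by unfold Pre_get_label_set; infer_instance
def pvWitness_get_label_set : List Int × Int := ([0, 5, 12], 4)

def Spec_get_label_set (class_label_batch : List Int) (n_classes : Int) (out : List (List Int)) : Prop := out = get_label_set_alt class_label_batch n_classes
instance (class_label_batch : List Int) (n_classes : Int) (out : List (List Int)) : Decidable (Spec_get_label_set class_label_batch n_classes out) := by unfold Spec_get_label_set; infer_instance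

-- ===== CLAIM (what is proved, stated in full; the proofs are below) =====
def Claim_equal_get_label_set : Prop := ∀ (class_label_batch : List Int) (n_classes : Int), Dom_get_label_set class_label_batch n_classes → Pre_get_label_set class_label_batch n_classes → Spec_get_label_set class_label_batch n_classes (get_label_set class_label_batch n_classes)

-- ===== LEMMAS AND PROOFS =====

-- msb-first binary digits of a natural number; the mathematical content of bin(m)[2:]
def pvBits (m : Nat) : List Nat :=
  if m < 2 then [m] else pvBits (m / 2) ++ [m % 2]
decreasing_by exact Nat.div_lt_self (by omega) (by omega)

lemma pvBits_ne_nil (m : Nat) : pvBits m ≠ [] := by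
  unfold pvBits; split <;> simp

lemma pvBits_lt_two (m : Nat) : ∀ x ∈ pvBits m, x < 2 := by
  induction m using pvBits.induct with
  | case1 m h => intro x hx; unfold pvBits at hx; simp [h] at hx; omega
  | case2 m h ih =>
    intro x hx; unfold pvBits at hx; simp [h] at hx
    rcases hx with hx | hx
    · exact ih x hx
    · omega

lemma pvBits_lt_pow (m : Nat) : m < 2 ^ (pvBits m).length := by
  induction m using pvBits.induct with
  | case1 m h =>
    have hl : (pvBits m).length = 1 := by rw [pvBits, if_pos h]; rfl
    rw [hl]
    have : (2:Nat) ^ 1 = 2 := rfl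
    omega
  | case2 m h ih =>
    have hl : (pvBits m).length = (pvBits (m / 2)).length + 1 := by
      rw [pvBits, if_neg h]; simp
    rw [hl]
    have h2 : 2 ^ ((pvBits (m / 2)).length + 1) = 2 * 2 ^ (pvBits (m / 2)).length := by ring
    omega

lemma pvBits_length (m : Nat) :
    (pvBits m).length = max 1 (PySem.Int.bitLength (m : Int)) := by
  induction m using pvBits.induct with
  | case1 m h =>
    interval_cases m <;> unfold pvBits <;> decide
  | case2 m h ih =>
    unfold pvBits
    rw [if_neg h]
    have hbl : PySem.Int.bitLength (m : Int) = PySem.Int.bitLength ((m / 2 : Nat) : Int) + 1 :=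
      PySem.Int.bitLength_natCast (by omega)
    have hpos : 1 ≤ PySem.Int.bitLength ((m / 2 : Nat) : Int) := by
      by_contra hc
      have h0 : PySem.Int.bitLength ((m / 2 : Nat) : Int) = 0 := by omega
      have := PySem.Int.lt_two_pow_bitLength ((m / 2 : Nat) : Int)
      rw [h0] at this
      simp at this
      omega
    simp only [List.length_append, List.length_cons, List.length_nil]
    omega

-- toDigitsCore computes exactly the digit characters of pvBits
lemma toDigitsCore_eq (fuel : Nat) :
    ∀ n ds, n < fuel →
      Nat.toDigitsCore 2 fuel n ds = (pvBits n).map Nat.digitChar ++ ds := by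
  induction fuel with
  | zero => intro n ds h; omega
  | succ f ih =>
    intro n ds h
    rw [Nat.toDigitsCore]
    by_cases h2 : n < 2
    · have : n / 2 = 0 := by omega
      simp [this]
      unfold pvBits
      rw [if_pos h2]
      have : n % 2 = n := by omega
      simp [this]
    · have hne : ¬ n / 2 = 0 := by omega
      simp only [hne, if_false]
      rw [ih (n / 2) _ (by omega)]
      conv_rhs => rw [pvBits, if_neg h2]
      simp

lemma toDigits_eq (m : Nat) :
    Nat.toDigits 2 m = (pvBits m).map Nat.digitChar := by
  have := toDigitsCore_eq (m + 1) m [] (by omega)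
  simpa [Nat.toDigits] using this

-- the per-digit int(i) of A turns the digit chars back into the bits
lemma map_charToInt (m : Nat) :
    ((pvBits m).map Nat.digitChar).map (fun i => (PySem.Int.ofChars? [i]).getD 0)
      = (pvBits m).map (fun x : Nat => (x : Int)) := by
  rw [List.map_map]
  apply List.map_congr_left
  intro x hx
  have := pvBits_lt_two m x hx
  interval_cases x <;> decide

-- core: the bit-extraction row of exact width reproduces pvBits
lemma bits_core (m : Nat) :
    (List.range (pvBits m).length).map
        (fun k => m / 2 ^ ((pvBits m).length - 1 - k) % 2) = pvBits m := by
  induction m using pvBits.induct with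
  | case1 m h =>
    conv_rhs => rw [pvBits, if_pos h]
    have hl : (pvBits m).length = 1 := by rw [pvBits, if_pos h]; rfl
    rw [hl, List.range_one, List.map_cons, List.map_nil]
    have e1 : (1:Nat) - 1 - 0 = 0 := rfl
    rw [e1, pow_zero, Nat.div_one]
    have hv : m % 2 = m := by omega
    rw [hv]
  | case2 m h ih =>
    have hstep : pvBits m = pvBits (m / 2) ++ [m % 2] := by rw [pvBits, if_neg h]
    have hl : (pvBits m).length = (pvBits (m / 2)).length + 1 := by
      rw [hstep]; simp
    rw [hl, List.range_succ, List.map_append]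
    conv_rhs => rw [hstep]
    congr 1
    · have hpt : (List.range (pvBits (m / 2)).length).map
            (fun k => m / 2 ^ ((pvBits (m / 2)).length + 1 - 1 - k) % 2)
          = (List.range (pvBits (m / 2)).length).map
            (fun k => m / 2 / 2 ^ ((pvBits (m / 2)).length - 1 - k) % 2) := by
        apply List.map_congr_left
        intro k hk
        have hk' : k < (pvBits (m / 2)).length := List.mem_range.mp hk
        have he : (pvBits (m / 2)).length + 1 - 1 - k = ((pvBits (m / 2)).length - 1 - k) + 1 := by
          omega
        rw [he, pow_succ, mul_comm, ← Nat.div_div_eq_div_mul]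
      rw [hpt, ih]
    · simp

-- padded: any width ≥ the bit length yields leading zeros then pvBits
lemma bits_padded (w : Nat) :
    ∀ m, (pvBits m).length ≤ w →
      (List.range w).map (fun k => m / 2 ^ (w - 1 - k) % 2)
        = List.replicate (w - (pvBits m).length) 0 ++ pvBits m := by
  induction w with
  | zero =>
    intro m hm
    have := pvBits_ne_nil m
    have : 0 < (pvBits m).length := List.length_pos_iff.mpr this
    omega
  | succ w ih =>
    intro m hm
    by_cases heq : (pvBits m).length = w + 1
    · rw [← heq]
      simpa using bits_core m
    · have hle : (pvBits m).length ≤ w := by omega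
      have hlt : m < 2 ^ w := by
        have h1 := pvBits_lt_pow m
        have h2 : (2:Nat) ^ (pvBits m).length ≤ 2 ^ w := Nat.pow_le_pow_right (by omega) hle
        omega
      rw [List.range_succ_eq_map, List.map_cons, List.map_map]
      have hhead : m / 2 ^ (w + 1 - 1 - 0) % 2 = 0 := by
        have he : w + 1 - 1 - 0 = w := by omega
        rw [he, Nat.div_eq_of_lt hlt]
      have htail :
          (List.range w).map ((fun k => m / 2 ^ (w + 1 - 1 - k) % 2) ∘ Nat.succ)
            = (List.range w).map (fun k => m / 2 ^ (w - 1 - k) % 2) := by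
        apply List.map_congr_left
        intro k hk
        show m / 2 ^ (w + 1 - 1 - (k + 1)) % 2 = m / 2 ^ (w - 1 - k) % 2
        have he : w + 1 - 1 - (k + 1) = w - 1 - k := by omega
        rw [he]
      rw [hhead, htail, ih m hle]
      have hrep : w + 1 - (pvBits m).length = (w - (pvBits m).length) + 1 := by omega
      rw [hrep, List.replicate_succ]
      rfl

-- the two per-element rows agree on nonnegative labels
lemma row_eq (n_classes : Int) (n : Int) (hn : 0 ≤ n) :
    (let label_set := PySem.Chars.slice (PySem.Int.toBinChars0b n) (some 2) none
     let label_set2 := label_set.map (fun i => (PySem.Int.ofChars? [i]).getD 0)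
     List.replicate (n_classes - (label_set2.length : Int)).toNat (0 : Int) ++ label_set2)
    = (let width := max (max n_classes ((PySem.Int.bitLength n : Nat) : Int)) 1
       (PySem.List.pyRange 0 width 1).map
         (fun i => PySem.Int.band (n >>> (width - 1 - i).toNat) 1)) := by
  obtain ⟨m, rfl⟩ := Int.eq_ofNat_of_zero_le hn
  simp only []
  -- A side
  have hA0 : PySem.Int.toBinChars0b (m : Int) = '0' :: 'b' :: Nat.toDigits 2 m := by
    simp [PySem.Int.toBinChars0b]
  have hslice : PySem.Chars.slice ('0' :: 'b' :: Nat.toDigits 2 m) (some 2) none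
      = Nat.toDigits 2 m := by simp [pysem]
  rw [hA0, hslice, toDigits_eq, map_charToInt]
  -- B side: width as a natural number
  set bl : Nat := PySem.Int.bitLength (m : Int) with hbl
  set width : Int := max (max n_classes ((bl : Nat) : Int)) 1 with hwidth
  have hw1 : (1 : Int) ≤ width := le_max_right _ _
  have hwbl : ((bl : Nat) : Int) ≤ width := le_trans (le_max_right _ _) (le_max_left _ _)
  have hwnc : n_classes ≤ width := le_trans (le_max_left _ _) (le_max_left _ _)
  have hwcases : width = n_classes ∨ width = ((bl : Nat) : Int) ∨ width = 1 := by
    rcases max_choice (max n_classes ((bl : Nat) : Int)) 1 with h | h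
    · rcases max_choice n_classes ((bl : Nat) : Int) with h2 | h2
      · left; rw [hwidth, h, h2]
      · right; left; rw [hwidth, h, h2]
    · right; right; rw [hwidth, h]
  set w : Nat := width.toNat with hwn
  have hwcast : width = (w : Int) := by omega
  rw [hwcast, PySem.List.pyRange_zero_natCast, List.map_map]
  -- reduce the B row pointwise to the Nat-level bit extraction
  have hrow : (List.range w).map
        ((fun i => PySem.Int.band ((m : Int) >>> (((w : Nat) : Int) - 1 - i).toNat) 1) ∘ (fun k : Nat => (k : Int)))
      = (List.range w).map (fun k => ((m / 2 ^ (w - 1 - k) % 2 : Nat) : Int)) := by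
    apply List.map_congr_left
    intro k hk
    simp only [Function.comp]
    have hsh : (((w : Nat) : Int) - 1 - (k : Int)).toNat = w - 1 - k := by omega
    rw [hsh]
    have hcast : (m : Int) >>> (w - 1 - k) = ((m >>> (w - 1 - k) : Nat) : Int) := rfl
    rw [hcast]
    have hband := PySem.Int.band_natCast (m >>> (w - 1 - k)) 1
    simpa [Nat.and_one_is_mod, Nat.shiftRight_eq_div_pow] using hband
  rw [hrow]
  -- lengths
  have hL : (pvBits m).length = max 1 bl := pvBits_length m
  have hL1 : 1 ≤ (pvBits m).length := by omega
  have hLbl : bl ≤ (pvBits m).length := by omega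
  have hLcases : (pvBits m).length = 1 ∨ (pvBits m).length = bl := by omega
  have hLw : (pvBits m).length ≤ w := by omega
  -- assemble
  have hmap : (List.range w).map (fun k => ((m / 2 ^ (w - 1 - k) % 2 : Nat) : Int))
      = ((List.range w).map (fun k => m / 2 ^ (w - 1 - k) % 2)).map (fun x : Nat => (x : Int)) := by
    rw [List.map_map]; rfl
  rw [hmap, bits_padded w m hLw, List.map_append, List.map_replicate]
  simp only [List.length_map, Nat.cast_zero]
  congr 2
  omega

-- ===== VERDICT (by name: the statement is the Claim_ definition above) =====
theorem get_label_set_spec : Claim_equal_get_label_set := by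
  intro batch n_classes _hdom hpre
  unfold Spec_get_label_set get_label_set get_label_set_alt
  rw [PySem.List.foldl_append_singleton_eq_map, PySem.List.foldl_append_singleton_eq_map]
  simp only [List.nil_append]
  apply List.map_congr_left
  intro x hx
  exact row_eq n_classes x (hpre x hx)
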